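-- pv_equiv track=rewrite | github.com/vchik765/saver | quran.py | _refine_ayahs
-- ===== SOURCE A (Python) =====
-- def _refine_ayahs(ayah_hits: dict[int, int]) -> list[int]:
--     """Из набора {аят: число_попаданий} выбирает ОДИН плотный кластер
--     подряд идущих аятов и отбрасывает шумовые единичные совпадения.
--
--     Зачем: общие фразы вроде «الله رب العالمين» 4-граммой попадают в
--     десятки случайных аятов сразу. Раньше мы возвращали min..max от ВСЕХ
--     попавших, поэтому диапазон постоянно врал (например 1-87 вместо 5-7).
--     Теперь:
--       1. Сортируем аяты с попаданиями.
--       2. Группируем в кластеры — новый кластер начинаем при разрыве > GAP.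
--       3. Берём кластер с максимальной суммой попаданий, при равенстве — с
--          наибольшим числом аятов (выбор по плотности recitation, а не по
--          случайному шуму).
--       4. Возвращаем отсортированный список аятов кластера; вызывающий
--          сделает min..max.
--     """
--     if not ayah_hits:
--         return []
--     sorted_ayahs = sorted(ayah_hits.keys())
--     if len(sorted_ayahs) == 1:
--         return sorted_ayahs
--
--     GAP = 3   # допустимый «провал» внутри одного кластера (в номерах аятов)
--     clusters: list[list[int]] = [[sorted_ayahs[0]]]
--     for a in sorted_ayahs[1:]:
--         if a - clusters[-1][-1] <= GAP:
--             clusters[-1].append(a)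
--         else:
--             clusters.append([a])
--
--     def score(cluster: list[int]) -> tuple[int, int]:
--         return (sum(ayah_hits[a] for a in cluster), len(cluster))
--
--     best = max(clusters, key=score)
--     return best
-- ===== SOURCE B (Python) =====
-- def _refine_ayahs(ayah_hits: dict[int, int]) -> list[int]:
--     """Single pass over the sorted ayahs: maintain the current cluster and a
--     running best (cluster, sum, len); finalize at each gap > GAP, updating the
--     best only on a strictly greater (sum, len) so ties keep the earlier cluster."""
--     keys = sorted(ayah_hits.keys())
--     if not keys:
--         return []
--     if len(keys) == 1:
--         return keys
--     GAP = 3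
--     best = None  # (cluster, sum, len) or None
--     cur = [keys[0]]
--     cur_sum = ayah_hits[keys[0]]
--     for a in keys[1:]:
--         if a - cur[-1] <= GAP:
--             cur.append(a)
--             cur_sum += ayah_hits[a]
--         else:
--             if best is None or (cur_sum, len(cur)) > (best[1], best[2]):
--                 best = (cur, cur_sum, len(cur))
--             cur = [a]
--             cur_sum = ayah_hits[a]
--     if best is None or (cur_sum, len(cur)) > (best[1], best[2]):
--         best = (cur, cur_sum, len(cur))
--     return best[0]
-- ===== Notes on version B (the rewrite author's own statement) =====
-- stated objective: alternative
-- what changed: Instead of materializing the full list of clusters and then taking max(clusters, key=score), B streams once over the sorted ayahs, carrying the current cluster with its running hit-sum and a best (cluster, sum, len) that is replaced only on a strictly greater (sum, len), so no intermediate cluster list and no second scoring pass exist.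
import Mathlib
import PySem

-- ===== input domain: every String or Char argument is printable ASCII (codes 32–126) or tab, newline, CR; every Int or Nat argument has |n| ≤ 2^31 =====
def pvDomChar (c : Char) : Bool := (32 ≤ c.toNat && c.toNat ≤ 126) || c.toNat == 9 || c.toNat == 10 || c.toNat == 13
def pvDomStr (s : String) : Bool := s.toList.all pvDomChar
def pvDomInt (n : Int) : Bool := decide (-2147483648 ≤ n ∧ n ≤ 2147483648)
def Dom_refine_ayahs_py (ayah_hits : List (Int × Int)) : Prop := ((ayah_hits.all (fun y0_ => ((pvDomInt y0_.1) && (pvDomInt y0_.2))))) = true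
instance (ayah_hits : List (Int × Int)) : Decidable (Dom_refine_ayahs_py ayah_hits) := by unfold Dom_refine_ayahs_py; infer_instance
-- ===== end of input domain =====

-- B replaces A's build-all-clusters-then-max(clusters, key=score) with one streaming pass
-- keeping a running best (cluster, sum, len); same results, same cost (objective: alternative).


-- ===== PORT A =====
-- score's sum(ayah_hits[a] for a in cluster): every a in a cluster is a key of the dict,
-- so Dict.getD with default 0 is exact here (the default is never used).
def pvScoreSum (d : PySem.Dict Int Int) (cluster : List Int) : Int :=
  (cluster.map (fun a => d.getD a 0)).sum

-- loop body of A's clustering 'for' loop (clusters[-1].append(a) = replace the last list)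
def pvStepA (cs : List (List Int)) (a : Int) : List (List Int) :=
  if a - PySem.List.pyGetD (PySem.List.pyGetD cs (-1) []) (-1) 0 ≤ 3 then
    cs.dropLast ++ [PySem.List.pyGetD cs (-1) [] ++ [a]]
  else cs ++ [[a]]

def refine_ayahs_py (ayah_hits : List (Int × Int)) : List Int :=
  let d : PySem.Dict Int Int := PySem.Dict.ofList ayah_hits
  if d.items = [] then []
  else
    let sorted_ayahs := PySem.List.sorted d.keys (fun x => x) false
    if sorted_ayahs.length = 1 then sorted_ayahs
    else
      let clusters := (sorted_ayahs.drop 1).foldl pvStepA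
        [[PySem.List.pyGetD sorted_ayahs 0 0]]
      -- max(clusters, key=score) with the tuple key (sum, len)
      (PySem.List.max2? clusters (fun c => pvScoreSum d c) (fun c => (c.length : Int))).getD []

-- ===== PORT B =====
def pvHit (d : PySem.Dict Int Int) (a : Int) : Int := d.getD a 0

-- 'if best is None or (cur_sum, len(cur)) > (best[1], best[2]): best = (cur, cur_sum, len(cur))'
def pvBetter (best : Option (List Int × Int × Int)) (cur : List Int) (s : Int) :
    List Int × Int × Int :=
  match best with
  | none => (cur, s, (cur.length : Int))
  | some (b, bs, bl) =>
    if bs < s ∨ (bs = s ∧ bl < (cur.length : Int)) then (cur, s, (cur.length : Int))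
    else (b, bs, bl)

-- loop body of B's single pass: state = (best, current cluster, its running sum)
def pvStepB (d : PySem.Dict Int Int)
    (st : Option (List Int × Int × Int) × List Int × Int) (a : Int) :
    Option (List Int × Int × Int) × List Int × Int :=
  if a - PySem.List.pyGetD st.2.1 (-1) 0 ≤ 3 then (st.1, st.2.1 ++ [a], st.2.2 + pvHit d a)
  else (some (pvBetter st.1 st.2.1 st.2.2), [a], pvHit d a)

def refine_ayahs_py_alt (ayah_hits : List (Int × Int)) : List Int :=
  let d : PySem.Dict Int Int := PySem.Dict.ofList ayah_hits
  match PySem.List.sorted d.keys (fun x => x) false with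
  | [] => []
  | [k] => [k]
  | k :: rest =>
    let st := rest.foldl (pvStepB d) (none, [k], pvHit d k)
    (pvBetter st.1 st.2.1 st.2.2).1

-- ===== PRECONDITION & SPEC =====
def Spec_refine_ayahs_py (ayah_hits : List (Int × Int)) (out : List Int) : Prop := out = refine_ayahs_py_alt ayah_hits
instance (ayah_hits : List (Int × Int)) (out : List Int) : Decidable (Spec_refine_ayahs_py ayah_hits out) := by unfold Spec_refine_ayahs_py; infer_instance

-- ===== CLAIM (what is proved, stated in full; the proofs are below) =====
def Claim_equal_refine_ayahs_py : Prop := ∀ (ayah_hits : List (Int × Int)), Dom_refine_ayahs_py ayah_hits → Spec_refine_ayahs_py ayah_hits (refine_ayahs_py ayah_hits)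

-- ===== LEMMAS AND PROOFS =====

-- the step of PySem.List.max2? specialized to A's (sum, len) key
def pvUpd (d : PySem.Dict Int Int) (acc : Option (List Int)) (x : List Int) :
    Option (List Int) :=
  match acc with
  | none => some x
  | some m =>
    if (decide (pvScoreSum d m < pvScoreSum d x) ||
        (!decide (pvScoreSum d x < pvScoreSum d m) &&
          decide ((m.length : Int) < (x.length : Int)))) = true
    then some x else some m

def pvTri (d : PySem.Dict Int Int) (c : List Int) : List Int × Int × Int :=
  (c, pvScoreSum d c, (c.length : Int))

lemma pvMax2_eq (d : PySem.Dict Int Int) (xs : List (List Int)) :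
    PySem.List.max2? xs (fun c => pvScoreSum d c) (fun c => (c.length : Int)) =
      xs.foldl (pvUpd d) none := by
  unfold PySem.List.max2?
  apply PySem.List.foldl_congr_mem
  intro acc x _
  cases acc <;> rfl

lemma pvCond_iff (d : PySem.Dict Int Int) (b cur : List Int) :
    (decide (pvScoreSum d b < pvScoreSum d cur) ||
        (!decide (pvScoreSum d cur < pvScoreSum d b) &&
          decide ((b.length : Int) < (cur.length : Int)))) = true ↔
      (pvScoreSum d b < pvScoreSum d cur ∨
        (pvScoreSum d b = pvScoreSum d cur ∧ (b.length : Int) < (cur.length : Int))) := by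
  simp only [Bool.or_eq_true, Bool.and_eq_true, Bool.not_eq_true', decide_eq_true_eq,
    decide_eq_false_iff_not]
  omega

lemma pvBetter_fst (d : PySem.Dict Int Int) (oA : Option (List Int)) (cur : List Int)
    (s : Int) (hs : s = pvScoreSum d cur) :
    (pvBetter (oA.map (pvTri d)) cur s).1 = (pvUpd d oA cur).getD [] := by
  cases oA with
  | none => simp [pvBetter, pvUpd]
  | some b =>
    subst hs
    simp only [Option.map_some, pvTri, pvBetter, pvUpd]
    by_cases hP : pvScoreSum d b < pvScoreSum d cur ∨
        (pvScoreSum d b = pvScoreSum d cur ∧ (b.length : Int) < (cur.length : Int))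
    · rw [if_pos hP, if_pos ((pvCond_iff d b cur).mpr hP)]; rfl
    · rw [if_neg hP, if_neg (fun h => hP ((pvCond_iff d b cur).mp h))]; rfl

lemma pvBetter_tri (d : PySem.Dict Int Int) (oA : Option (List Int)) (cur : List Int)
    (s : Int) (hs : s = pvScoreSum d cur) :
    some (pvBetter (oA.map (pvTri d)) cur s) = (pvUpd d oA cur).map (pvTri d) := by
  cases oA with
  | none => simp [pvBetter, pvUpd, pvTri, hs]
  | some b =>
    subst hs
    simp only [Option.map_some, pvTri, pvBetter, pvUpd]
    by_cases hP : pvScoreSum d b < pvScoreSum d cur ∨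
        (pvScoreSum d b = pvScoreSum d cur ∧ (b.length : Int) < (cur.length : Int))
    · rw [if_pos hP, if_pos ((pvCond_iff d b cur).mpr hP)]; rfl
    · rw [if_neg hP, if_neg (fun h => hP ((pvCond_iff d b cur).mp h))]; rfl

lemma pvScoreSum_append (d : PySem.Dict Int Int) (c : List Int) (a : Int) :
    pvScoreSum d (c ++ [a]) = pvScoreSum d c + pvHit d a := by
  simp [pvScoreSum, pvHit]

lemma pvMain (d : PySem.Dict Int Int) (rest : List Int) :
    ∀ (F : List (List Int)) (cur : List Int) (s : Int), s = pvScoreSum d cur →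
      (let st := rest.foldl (pvStepB d) ((F.foldl (pvUpd d) none).map (pvTri d), cur, s);
        (pvBetter st.1 st.2.1 st.2.2).1)
      = ((rest.foldl pvStepA (F ++ [cur])).foldl (pvUpd d) none).getD [] := by
  induction rest with
  | nil =>
    intro F cur s hs
    simp only [List.foldl_nil, List.foldl_append, List.foldl_cons]
    exact pvBetter_fst d (F.foldl (pvUpd d) none) cur s hs
  | cons a rest ih =>
    intro F cur s hs
    simp only [List.foldl_cons]
    by_cases hc : a - PySem.List.pyGetD cur (-1) 0 ≤ 3
    · have hA : pvStepA (F ++ [cur]) a = F ++ [cur ++ [a]] := by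
        simp [pvStepA, hc]
      have hB : pvStepB d ((F.foldl (pvUpd d) none).map (pvTri d), cur, s) a
          = ((F.foldl (pvUpd d) none).map (pvTri d), cur ++ [a], s + pvHit d a) := by
        simp [pvStepB, hc]
      rw [hA, hB]
      exact ih F (cur ++ [a]) (s + pvHit d a) (by rw [hs, pvScoreSum_append])
    · have hA : pvStepA (F ++ [cur]) a = (F ++ [cur]) ++ [[a]] := by
        simp [pvStepA, hc]
      have hB : pvStepB d ((F.foldl (pvUpd d) none).map (pvTri d), cur, s) a
          = (((F ++ [cur]).foldl (pvUpd d) none).map (pvTri d), [a], pvHit d a) := by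
        simp only [pvStepB, if_neg hc, List.foldl_append, List.foldl_cons, List.foldl_nil]
        rw [pvBetter_tri d (F.foldl (pvUpd d) none) cur s hs]
      rw [hA, hB]
      exact ih (F ++ [cur]) [a] (pvHit d a) (by simp [pvScoreSum, pvHit])

-- ===== VERDICT (by name: the statement is the Claim_ definition above) =====
theorem refine_ayahs_py_spec : Claim_equal_refine_ayahs_py := by
  intro ayah_hits _
  unfold Spec_refine_ayahs_py refine_ayahs_py refine_ayahs_py_alt
  set d : PySem.Dict Int Int := PySem.Dict.ofList ayah_hits with hd
  have hkeys : d.keys = d.items.map (·.1) := rfl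
  cases hs : PySem.List.sorted d.keys (fun x => x) false with
  | nil =>
    have hknil : d.keys = [] := (PySem.List.sorted_eq_nil_iff _ _ _).mp hs
    have hitems : d.items = [] := by
      rcases List.map_eq_nil_iff.mp (hkeys ▸ hknil) with h; exact h
    simp [hitems, hs]
  | cons k rest =>
    have hne : d.items ≠ [] := by
      intro h
      have hknil : d.keys = [] := by rw [hkeys, h]; rfl
      rw [hknil] at hs
      have hnil : PySem.List.sorted ([] : List Int) (fun x => x) false = [] := rfl
      rw [hnil] at hs
      exact (List.cons_ne_nil k rest) hs.symm
    cases rest with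
    | nil => simp [hne, hs]
    | cons r rs =>
      have hlen : (PySem.List.sorted d.keys (fun x => x) false).length ≠ 1 := by
        rw [hs]; simp
      have h0 : PySem.List.pyGetD (k :: r :: rs) 0 0 = k := by
        have hpos : (0 : Int) ≤ (rs.length : Int) + 1 := by positivity
        simp [PySem.List.pyGetD, PySem.List.pyGet?, PySem.List.pyIdx?, hpos]
      have hdrop : (k :: r :: rs).drop 1 = r :: rs := rfl
      simp only [hne, hs, if_false, List.length_cons]
      rw [pvMax2_eq]
      have hm := pvMain d (r :: rs) [] [k] (pvHit d k) (by simp [pvScoreSum, pvHit])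
      simp only [List.foldl_nil, Option.map_none, List.nil_append] at hm
      simp only [hdrop, h0]
      exact hm.symm
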